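-- pv_equiv track=rewrite | github.com/SeamanPilot/StockBot | stockbot/backtest.py | _period_to_days
-- ===== SOURCE A (Python) =====
-- def _period_to_days(period: str) -> int:
--     """Convert a yfinance-style period string to approximate days."""
--     period = period.lower().strip()
--     multipliers = {"d": 1, "w": 7, "mo": 30, "m": 30, "y": 365}
--     for suffix, mult in multipliers.items():
--         if period.endswith(suffix):
--             num = int(period[:-len(suffix)] or 1)
--             return num * mult
--     return 365  # default
-- ===== SOURCE B (Python) =====
-- import re
--
-- _UNITS = {"d": 1, "w": 7, "mo": 30, "m": 30, "y": 365}
-- # One anchored lazy regex: shortest prefix, remainder must be exactly one unit.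
-- _PERIOD_RE = re.compile(r'^(.*?)(mo|d|w|m|y)$', re.S)
--
--
-- def _period_to_days(period: str) -> int:
--     """Convert a yfinance-style period string to approximate days."""
--     m = _PERIOD_RE.match(period.lower().strip())
--     if m is None:
--         return 365  # default
--     return int(m.group(1) or 1) * _UNITS[m.group(2)]
-- ===== Notes on version B (the rewrite author's own statement) =====
-- stated objective: idiomatic
-- what changed: Replaced the dict-of-suffixes endswith loop with a single precompiled anchored lazy regex that captures the numeric prefix and the unit in one match; inputs whose matched numeric prefix is not int()-parsable raise ValueError in both and lie outside Pre_.
import Mathlib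
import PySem

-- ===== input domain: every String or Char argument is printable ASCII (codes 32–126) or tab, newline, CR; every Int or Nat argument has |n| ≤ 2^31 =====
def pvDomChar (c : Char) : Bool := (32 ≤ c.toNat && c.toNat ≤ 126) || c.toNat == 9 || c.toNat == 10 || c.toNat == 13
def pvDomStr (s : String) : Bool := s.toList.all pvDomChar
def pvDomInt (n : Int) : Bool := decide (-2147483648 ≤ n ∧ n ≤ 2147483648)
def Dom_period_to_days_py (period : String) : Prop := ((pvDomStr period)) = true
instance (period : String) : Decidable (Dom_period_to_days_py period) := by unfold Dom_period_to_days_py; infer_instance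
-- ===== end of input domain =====

-- B replaces A's dict-suffix endswith loop by a single anchored lazy-regex match (idiomatic); return values proved equal on Pre_ (where int() does not raise).

-- ===== PORT A =====
-- the dict loop: first suffix the string ends with wins; `int(period[:-len(suffix)] or 1)`
-- (Pre_ guarantees the int() parse succeeds, so .getD 0 is never the value returned)
def pvAloop (p : String) : List (String × Int) → Int
  | [] => 365
  | (suffix, mult) :: rest =>
    if PySem.Str.endswith p suffix then
      (let pref := PySem.Str.slice p none (some (-(suffix.length : Int)))
       (if pref = "" then 1 else (PySem.Int.ofStr? pref).getD 0) * mult)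
    else pvAloop p rest

def period_to_days_py (period : String) : Int :=
  let p := PySem.Str.strip (PySem.Str.lower period)
  pvAloop p [("d", 1), ("w", 7), ("mo", 30), ("m", 30), ("y", 365)]

-- ===== PORT B =====
-- hand port of re.match(r'^(.*?)(mo|d|w|m|y)$', p, re.S): the `$`-anchored group(2)
-- must be the WHOLE remainder, so the lazy engine grows the prefix one char at a
-- time until the remainder equals a unit (alternation order mo,d,w,m,y); exact.
def pvUnit? (rest : List Char) : Option Int :=
  if rest = ['m', 'o'] then some 30
  else if rest = ['d'] then some 1
  else if rest = ['w'] then some 7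
  else if rest = ['m'] then some 30
  else if rest = ['y'] then some 365
  else none

def pvBscan (pre rest : List Char) : Int :=
  match pvUnit? rest with
  | some mult => (if pre = [] then 1 else (PySem.Int.ofChars? pre).getD 0) * mult
  | none =>
    match rest with
    | [] => 365
    | c :: rs => pvBscan (pre ++ [c]) rs

def period_to_days_py_alt (period : String) : Int :=
  let p := PySem.Str.strip (PySem.Str.lower period)
  pvBscan [] p.toList

-- ===== PRECONDITION & SPEC =====
def pvNumOk (cs : List Char) : Bool := cs.isEmpty || (PySem.Int.ofChars? cs).isSome

-- Pre_ excludes exactly the inputs on which A (and B alike) raises ValueError: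
-- the lowered, stripped string ends in a unit suffix but the part before it is a
-- nonempty string int() cannot parse.
def Pre_period_to_days_py (period : String) : Prop :=
  (match (PySem.Chars.strip (PySem.Chars.lower period.toList)).reverse with
   | 'o' :: 'm' :: t => pvNumOk t.reverse
   | 'd' :: t => pvNumOk t.reverse
   | 'w' :: t => pvNumOk t.reverse
   | 'm' :: t => pvNumOk t.reverse
   | 'y' :: t => pvNumOk t.reverse
   | _ => true) = true
instance (period : String) : Decidable (Pre_period_to_days_py period) := by
  unfold Pre_period_to_days_py; infer_instance

def pvWitness_period_to_days_py : String := "3mo"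

def Spec_period_to_days_py (period : String) (out : Int) : Prop := out = period_to_days_py_alt period
instance (period : String) (out : Int) : Decidable (Spec_period_to_days_py period out) := by unfold Spec_period_to_days_py; infer_instance

-- ===== CLAIM (what is proved, stated in full; the proofs are below) =====
def Claim_equal_period_to_days_py : Prop := ∀ (period : String), Dom_period_to_days_py period → Pre_period_to_days_py period → Spec_period_to_days_py period (period_to_days_py period)

-- ===== LEMMAS AND PROOFS =====

-- the value `int(prefix or 1)` both programs compute from the numeric prefix
def pvVal (cs : List Char) : Int := if cs = [] then 1 else (PySem.Int.ofChars? cs).getD 0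

-- common normal form: case analysis on the REVERSED normalized string
def pvSpecRev (pre r : List Char) : Int :=
  match r with
  | [] => 365
  | c :: t =>
    if c = 'o' then
      (match t with
       | 'm' :: t' => pvVal (pre ++ t'.reverse) * 30
       | _ => 365)
    else if c = 'd' then pvVal (pre ++ t.reverse) * 1
    else if c = 'w' then pvVal (pre ++ t.reverse) * 7
    else if c = 'm' then pvVal (pre ++ t.reverse) * 30
    else if c = 'y' then pvVal (pre ++ t.reverse) * 365
    else 365

theorem pv_ends_rev (r s : List Char) : PySem.Chars.endswith (r.reverse) s = decide (s.reverse <+: r) := by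
  have h2 : (s <:+ r.reverse) ↔ (s.reverse <+: r) := by rw [← List.reverse_prefix]; simp
  have h1 := PySem.Chars.endswith_iff r.reverse s
  rcases hb : PySem.Chars.endswith r.reverse s with _|_ <;> simp_all

theorem pv_val_str (pref : String) :
    (if pref = "" then (1:Int) else (PySem.Int.ofStr? pref).getD 0) = pvVal pref.toList := by
  have he : (pref = "") ↔ pref.toList = [] :=
    ⟨fun h => h ▸ rfl, fun h => String.ext (by simpa [String.toList] using h)⟩
  simp only [pvVal, he, PySem.Int.ofStr?]

theorem pvBscan_eq_spec (rest : List Char) : ∀ pre, pvBscan pre rest = pvSpecRev pre rest.reverse := by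
  induction rest with
  | nil => intro pre; simp [pvBscan, pvUnit?, pvSpecRev]
  | cons c rs ih =>
    intro pre
    rw [show (c :: rs).reverse = rs.reverse ++ [c] by simp]
    rcases hu : pvUnit? (c :: rs) with _ | m
    · -- no unit matches the whole remainder: the lazy engine grows the prefix
      rw [pvBscan, hu, ih]
      rcases h : rs.reverse with _ | ⟨x, t'⟩
      · have hrs : rs = [] := by simpa using congrArg List.reverse h
        subst hrs
        simp only [pvUnit?] at hu
        split_ifs at hu with h1 h2 h3 h4 h5
        simp_all [pvSpecRev]
      · have hrs : rs = (x :: t').reverse := by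
          have := congrArg List.reverse h; simpa using this
        by_cases hx : x = 'o'
        · subst hx
          rcases t' with _ | ⟨z, t''⟩
          · have hcm : c ≠ 'm' := by
              intro hc; subst hc
              simp [hrs, pvUnit?] at hu
            simp [pvSpecRev, hcm]
          · by_cases hz : z = 'm'
            · subst hz
              simp [pvSpecRev, pvVal, List.append_assoc]
            · simp [pvSpecRev, hz]
        · simp [pvSpecRev, hx, pvVal, List.append_assoc]
    · -- the whole remainder is a unit: both sides are val(prefix) * mult
      have hu' := hu
      simp only [pvUnit?] at hu'
      split_ifs at hu' with h1 h2 h3 h4 h5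
      · obtain ⟨rfl, rfl⟩ : c = 'm' ∧ rs = ['o'] := by simpa using h1
        simp [pvBscan, pvUnit?, pvSpecRev, pvVal]
      · obtain ⟨rfl, rfl⟩ : c = 'd' ∧ rs = [] := by simpa using h2
        simp [pvBscan, pvUnit?, pvSpecRev, pvVal]
      · obtain ⟨rfl, rfl⟩ : c = 'w' ∧ rs = [] := by simpa using h3
        simp [pvBscan, pvUnit?, pvSpecRev, pvVal]
      · obtain ⟨rfl, rfl⟩ : c = 'm' ∧ rs = [] := by simpa using h4
        simp [pvBscan, pvUnit?, pvSpecRev, pvVal]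
      · obtain ⟨rfl, rfl⟩ : c = 'y' ∧ rs = [] := by simpa using h5
        simp [pvBscan, pvUnit?, pvSpecRev, pvVal]

theorem pvAloop_eq_spec' (r : List Char) (p : String) (hp : p.toList = r.reverse) :
    pvAloop p [("d", 1), ("w", 7), ("mo", 30), ("m", 30), ("y", 365)] =
      pvSpecRev [] r := by
  have hsl : ∀ k : Int, (PySem.Str.slice p none (some k)).toList = PySem.List.slice r.reverse none (some k) := by
    intro k; simp [hp]
  have hend : ∀ s : String, PySem.Str.endswith p s = decide (s.toList.reverse <+: r) := by
    intro s; rw [PySem.Str.endswith_eq, hp, pv_ends_rev]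
  simp only [pvAloop, hend, pv_val_str, hsl]
  rw [show (-("d".length:Int)) = -1 from rfl, show (-("w".length:Int)) = -1 from rfl,
      show (-("mo".length:Int)) = -2 from rfl, show (-("m".length:Int)) = -1 from rfl,
      show (-("y".length:Int)) = -1 from rfl]
  rcases r with _ | ⟨c, t⟩
  · simp [pvSpecRev]
  · by_cases hc : c = 'd'
    · subst hc
      simp [pvSpecRev, List.cons_prefix_cons, PySem.List.slice_to_neg_one, pvVal]
    · by_cases hw : c = 'w'
      · subst hw
        simp [pvSpecRev, List.cons_prefix_cons, PySem.List.slice_to_neg_one, pvVal, hc]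
      · by_cases ho : c = 'o'
        · subst ho
          rcases t with _ | ⟨x, t'⟩
          · simp [pvSpecRev, List.cons_prefix_cons]
          · by_cases hx : x = 'm'
            · subst hx
              rw [PySem.List.slice_to_neg_ofNat (('o'::'m'::t').reverse) 2 (by omega)]
              simp [pvSpecRev, List.cons_prefix_cons]
            · simp [pvSpecRev, List.cons_prefix_cons, hx, eq_comm]
        · by_cases hm : c = 'm'
          · subst hm
            simp [pvSpecRev, List.cons_prefix_cons, PySem.List.slice_to_neg_one, hc, hw, ho]
          · by_cases hy : c = 'y'
            · subst hy
              simp [pvSpecRev, List.cons_prefix_cons, PySem.List.slice_to_neg_one, hc, hw, ho, hm]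
            · simp [pvSpecRev, List.cons_prefix_cons, hc, hw, ho, hm, hy, eq_comm]

theorem pvAloop_eq_spec (p : String) :
    pvAloop p [("d", 1), ("w", 7), ("mo", 30), ("m", 30), ("y", 365)] =
      pvSpecRev [] p.toList.reverse := by
  exact pvAloop_eq_spec' p.toList.reverse p (by simp)

-- ===== VERDICT (by name: the statement is the Claim_ definition above) =====
theorem period_to_days_py_spec : Claim_equal_period_to_days_py := by
  intro period _ _
  unfold Spec_period_to_days_py period_to_days_py period_to_days_py_alt
  rw [pvBscan_eq_spec, pvAloop_eq_spec]
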